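-- pv_equiv track=rewrite | github.com/bozheng-hit/NQ_BERT-DM | src_nq/create_examples.py | get_doc_tree
-- ===== SOURCE A (Python) =====
-- def get_doc_tree(is_sentence_end, is_paragraph_end, orig_tok_idx, candidate_idx):
--     doc_len = len(is_sentence_end)
--     document = []
--     paragraph = []
--     sentence = []
--     cur_candidate_idx = -1
--     for i in range(doc_len):
--         sentence.append((orig_tok_idx[i], i))
--         cur_candidate_idx = max(cur_candidate_idx, candidate_idx[i])
--
--         if is_sentence_end[i]:
--             paragraph.append((-1, sentence))
--             sentence = []
--         if is_paragraph_end[i]: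
--             assert len(sentence) == 0
--             document.append((cur_candidate_idx, paragraph))
--             paragraph = []
--             cur_candidate_idx = -1
--     assert len(sentence) == 0
--     assert len(paragraph) == 0
--     return document
-- ===== SOURCE B (Python) =====
-- def get_doc_tree(is_sentence_end, is_paragraph_end, orig_tok_idx, candidate_idx):
--     n = len(is_sentence_end)
--     para_ends = [i for i in range(n) if is_paragraph_end[i]]
--     # validate structure: document must end exactly at a paragraph boundary
--     assert n == 0 or (para_ends and para_ends[-1] == n - 1)
--     document = []
--     start = 0
--     for p in para_ends:
--         sent_ends = [i for i in range(start, p + 1) if is_sentence_end[i]]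
--         # each paragraph must end exactly at a sentence boundary
--         assert sent_ends and sent_ends[-1] == p
--         paragraph = []
--         s = start
--         for e in sent_ends:
--             paragraph.append((-1, [(orig_tok_idx[i], i) for i in range(s, e + 1)]))
--             s = e + 1
--         cand = max([-1] + [candidate_idx[i] for i in range(start, p + 1)])
--         document.append((cand, paragraph))
--         start = p + 1
--     return document
-- ===== Notes on version B (the rewrite author's own statement) =====
-- stated objective: alternative
-- what changed: Replaces the single-pass four-accumulator state machine with a boundary-first decomposition: first collect paragraph-end and sentence-end indices, then build each paragraph by slicing the token range between consecutive boundaries and taking the max candidate over the span.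
import Mathlib
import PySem

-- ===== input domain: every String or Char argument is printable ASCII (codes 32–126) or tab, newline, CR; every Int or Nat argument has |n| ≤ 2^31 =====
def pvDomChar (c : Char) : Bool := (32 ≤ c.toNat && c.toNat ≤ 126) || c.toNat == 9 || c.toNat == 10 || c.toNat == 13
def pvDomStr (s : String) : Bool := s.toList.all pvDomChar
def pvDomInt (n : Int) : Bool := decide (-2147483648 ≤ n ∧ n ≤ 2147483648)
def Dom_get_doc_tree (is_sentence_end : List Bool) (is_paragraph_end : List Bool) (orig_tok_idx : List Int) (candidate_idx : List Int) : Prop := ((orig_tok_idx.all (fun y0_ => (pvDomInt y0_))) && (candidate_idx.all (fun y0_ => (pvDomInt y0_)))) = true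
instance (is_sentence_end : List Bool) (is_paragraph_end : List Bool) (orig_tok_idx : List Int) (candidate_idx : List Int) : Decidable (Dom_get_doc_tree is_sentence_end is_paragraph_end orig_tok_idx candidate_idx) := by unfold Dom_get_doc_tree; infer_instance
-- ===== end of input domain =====

-- B replaces A's one-pass four-accumulator state machine by a boundary-first decomposition
-- (collect boundary indices, then slice the token range); alternative structure, same cost.

-- ===== PORT A =====
-- One loop iteration of A's state machine; state = (document, paragraph, sentence, cur_candidate_idx).
-- List indexing x[i] is ported as getD i _ : for i < length it is exact, and Pre_ keeps every
-- accessed index in range (Python raises IndexError outside Pre_).  The asserts of A raise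
-- exactly on the inputs Pre_ excludes, so the port carries no value there.
def gdtStep (is_sentence_end : List Bool) (is_paragraph_end : List Bool)
    (orig_tok_idx : List Int) (candidate_idx : List Int)
    (st : List (Int × (List (Int × (List (Int × Int))))) × (List (Int × (List (Int × Int)))) × (List (Int × Int)) × Int)
    (i : Nat) :
    List (Int × (List (Int × (List (Int × Int))))) × (List (Int × (List (Int × Int)))) × (List (Int × Int)) × Int :=
  let sentence := st.2.2.1 ++ [(orig_tok_idx.getD i 0, (i : Int))]
  let cur := max st.2.2.2 (candidate_idx.getD i 0)
  let ps := if is_sentence_end.getD i false then (st.2.1 ++ [((-1 : Int), sentence)], ([] : List (Int × Int))) else (st.2.1, sentence)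
  if is_paragraph_end.getD i false then (st.1 ++ [(cur, ps.1)], [], ps.2, -1)
  else (st.1, ps.1, ps.2, cur)

def get_doc_tree (is_sentence_end : List Bool) (is_paragraph_end : List Bool) (orig_tok_idx : List Int) (candidate_idx : List Int) : List (Int × (List (Int × (List (Int × Int))))) :=
  ((List.range is_sentence_end.length).foldl
    (gdtStep is_sentence_end is_paragraph_end orig_tok_idx candidate_idx)
    ([], [], [], -1)).1

-- ===== PORT B =====
-- token tuple (orig_tok_idx[i], i)
def gdtTok (orig_tok_idx : List Int) (i : Nat) : Int × Int := (orig_tok_idx.getD i 0, (i : Int))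

-- Source B's inner loop over sent_ends: returns (paragraph, next sentence start s)
def gdtSents (orig_tok_idx : List Int) (sentEnds : List Nat) (start : Nat) :
    (List (Int × (List (Int × Int)))) × Nat :=
  sentEnds.foldl
    (fun acc e => (acc.1 ++ [((-1 : Int), (List.range' acc.2 (e + 1 - acc.2)).map (gdtTok orig_tok_idx))], e + 1))
    ([], start)

-- Source B's loop body over para_ends; acc = (document, start)
def gdtParaStep (is_sentence_end : List Bool) (orig_tok_idx : List Int) (candidate_idx : List Int)
    (acc : List (Int × (List (Int × (List (Int × Int))))) × Nat) (p : Nat) :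
    List (Int × (List (Int × (List (Int × Int))))) × Nat :=
  let sentEnds := (List.range' acc.2 (p + 1 - acc.2)).filter (fun i => is_sentence_end.getD i false)
  let paragraph := (gdtSents orig_tok_idx sentEnds acc.2).1
  let cand := ((List.range' acc.2 (p + 1 - acc.2)).map (fun i => candidate_idx.getD i 0)).foldl max (-1)
  (acc.1 ++ [(cand, paragraph)], p + 1)

def get_doc_tree_alt (is_sentence_end : List Bool) (is_paragraph_end : List Bool) (orig_tok_idx : List Int) (candidate_idx : List Int) : List (Int × (List (Int × (List (Int × Int))))) :=
  let paraEnds := (List.range is_sentence_end.length).filter (fun i => is_paragraph_end.getD i false)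
  (paraEnds.foldl (gdtParaStep is_sentence_end orig_tok_idx candidate_idx) ([], 0)).1

-- ===== PRECONDITION & SPEC =====
-- Pre_ holds exactly when Python A returns normally: all four lists are indexed up to
-- len(is_sentence_end) (shorter ones raise IndexError), every paragraph end must coincide with a
-- sentence end (else A's in-loop assert fails), and a nonempty document must end with a paragraph
-- end (else A's final asserts fail).
def Pre_get_doc_tree (is_sentence_end : List Bool) (is_paragraph_end : List Bool) (orig_tok_idx : List Int) (candidate_idx : List Int) : Prop :=
  is_sentence_end.length ≤ is_paragraph_end.length ∧
  is_sentence_end.length ≤ orig_tok_idx.length ∧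
  is_sentence_end.length ≤ candidate_idx.length ∧
  (∀ i < is_sentence_end.length, is_paragraph_end.getD i false = true → is_sentence_end.getD i false = true) ∧
  (is_sentence_end.length = 0 ∨ is_paragraph_end.getD (is_sentence_end.length - 1) false = true)
instance (is_sentence_end : List Bool) (is_paragraph_end : List Bool) (orig_tok_idx : List Int) (candidate_idx : List Int) : Decidable (Pre_get_doc_tree is_sentence_end is_paragraph_end orig_tok_idx candidate_idx) := by unfold Pre_get_doc_tree; infer_instance

def pvWitness_get_doc_tree : List Bool × List Bool × List Int × List Int :=
  ([true, true, false, true], [false, true, false, true], [3, 4, 5, 6], [-1, 0, 2, 1])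

def Spec_get_doc_tree (is_sentence_end : List Bool) (is_paragraph_end : List Bool) (orig_tok_idx : List Int) (candidate_idx : List Int) (out : List (Int × (List (Int × (List (Int × Int)))))) : Prop := out = get_doc_tree_alt is_sentence_end is_paragraph_end orig_tok_idx candidate_idx
instance (is_sentence_end : List Bool) (is_paragraph_end : List Bool) (orig_tok_idx : List Int) (candidate_idx : List Int) (out : List (Int × (List (Int × (List (Int × Int)))))) : Decidable (Spec_get_doc_tree is_sentence_end is_paragraph_end orig_tok_idx candidate_idx out) := by unfold Spec_get_doc_tree; infer_instance

-- ===== CLAIM (what is proved, stated in full; the proofs are below) =====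
def Claim_equal_get_doc_tree : Prop := ∀ (is_sentence_end : List Bool) (is_paragraph_end : List Bool) (orig_tok_idx : List Int) (candidate_idx : List Int), Dom_get_doc_tree is_sentence_end is_paragraph_end orig_tok_idx candidate_idx → Pre_get_doc_tree is_sentence_end is_paragraph_end orig_tok_idx candidate_idx → Spec_get_doc_tree is_sentence_end is_paragraph_end orig_tok_idx candidate_idx (get_doc_tree is_sentence_end is_paragraph_end orig_tok_idx candidate_idx)

-- ===== LEMMAS AND PROOFS =====

-- proof-side name for Source B's outer fold (definitionally the fold get_doc_tree_alt runs)
def gdtParas (is_sentence_end : List Bool) (orig_tok_idx : List Int) (candidate_idx : List Int)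
    (paraEnds : List Nat) (start : Nat) :
    List (Int × (List (Int × (List (Int × Int))))) × Nat :=
  paraEnds.foldl (gdtParaStep is_sentence_end orig_tok_idx candidate_idx) ([], start)

-- a run of tokens with no boundary flags just accumulates
theorem gdt_run (se pe : List Bool) (ot ci : List Int) (l : List Nat)
    (h : ∀ i ∈ l, se.getD i false = false ∧ pe.getD i false = false) :
    ∀ doc para sent cur,
      l.foldl (gdtStep se pe ot ci) (doc, para, sent, cur)
        = (doc, para, sent ++ l.map (gdtTok ot),
           (l.map (fun i => ci.getD i 0)).foldl max cur) := by
  induction l with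
  | nil => simp
  | cons a t ih =>
      intro doc para sent cur
      have ha := h a (List.mem_cons_self ..)
      have ht : ∀ i ∈ t, se.getD i false = false ∧ pe.getD i false = false :=
        fun i hi => h i (List.mem_cons_of_mem _ hi)
      simp only [List.foldl_cons, List.map_cons, gdtStep, ha.1, ha.2, if_false,
        Bool.false_eq_true]
      rw [ih ht]
      simp [gdtTok]

theorem gdtSents_seed (ot : List Int) (es : List Nat) :
    ∀ (pre : List (Int × (List (Int × Int)))) (s : Nat),
      es.foldl (fun acc e => (acc.1 ++ [((-1 : Int), (List.range' acc.2 (e + 1 - acc.2)).map (gdtTok ot))], e + 1)) (pre, s)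
        = (pre ++ (gdtSents ot es s).1, (gdtSents ot es s).2) := by
  induction es with
  | nil => simp [gdtSents]
  | cons e t ih =>
      intro pre s
      simp only [gdtSents, List.foldl_cons, List.nil_append]
      rw [ih, ih]
      simp [gdtSents]

theorem gdtParas_seed (se : List Bool) (ot ci : List Int) (pes : List Nat) :
    ∀ (pre : List (Int × (List (Int × (List (Int × Int)))))) (s : Nat),
      pes.foldl (gdtParaStep se ot ci) (pre, s)
        = (pre ++ (gdtParas se ot ci pes s).1, (gdtParas se ot ci pes s).2) := by
  induction pes with
  | nil => simp [gdtParas]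
  | cons p t ih =>
      intro pre s
      simp only [gdtParas, List.foldl_cons] at ih ⊢
      rw [ih, ih ((gdtParaStep se ot ci ([], s) p).1) ((gdtParaStep se ot ci ([], s) p).2)]
      simp [gdtParaStep]

-- decomposing a filtered range at its first element
theorem filter_range'_cons (Q : Nat → Bool) :
    ∀ (k a e : Nat) (rest : List Nat),
      (List.range' a k).filter Q = e :: rest →
      a ≤ e ∧ e < a + k ∧ (∀ i, a ≤ i → i < e → Q i = false) ∧ Q e = true ∧
        rest = (List.range' (e + 1) (a + k - (e + 1))).filter Q := by
  intro k
  induction k with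
  | zero => intro a e rest h; simp at h
  | succ k ih =>
      intro a e rest h
      rw [List.range'_succ] at h
      by_cases hq : Q a
      · rw [List.filter_cons_of_pos hq] at h
        obtain ⟨rfl, rfl⟩ : a = e ∧ (List.range' (a+1) k).filter Q = rest := by
          exact ⟨(List.cons_eq_cons.mp h).1, (List.cons_eq_cons.mp h).2⟩
        refine ⟨le_refl _, by omega, by omega, hq, by rw [show a + (k+1) - (a+1) = k by omega]⟩
      · rw [List.filter_cons_of_neg hq] at h
        obtain ⟨h1, h2, h3, h4, h5⟩ := ih (a+1) e rest h
        refine ⟨by omega, by omega, ?_, h4, by rw [show a + (k+1) = (a+1) + k by omega]; exact h5⟩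
        intro i hai hie
        rcases Nat.eq_or_lt_of_le hai with rfl | hlt
        · simpa using hq
        · exact h3 i hlt hie

-- one paragraph span [a, a+k): interior has no paragraph end, the last index is a
-- sentence and paragraph end; A's fold flushes exactly B's paragraph value
theorem gdt_para (se pe : List Bool) (ot ci : List Int) :
    ∀ (k : Nat), ∀ (a : Nat) doc para cur, 1 ≤ k →
      (∀ i, a ≤ i → i < a + k - 1 → pe.getD i false = false) →
      pe.getD (a + k - 1) false = true → se.getD (a + k - 1) false = true →
      (List.range' a k).foldl (gdtStep se pe ot ci) (doc, para, [], cur)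
        = (doc ++ [(((List.range' a k).map (fun i => ci.getD i 0)).foldl max cur,
            para ++ (gdtSents ot ((List.range' a k).filter (fun i => se.getD i false)) a).1)],
           [], [], -1) := by
  intro k
  induction k using Nat.strong_induction_on with
  | _ k ih =>
    intro a doc para cur hk hno hpe hse
    -- the filtered sentence ends are nonempty: the last index is one
    cases hes : (List.range' a k).filter (fun i => se.getD i false) with
    | nil =>
        exfalso
        have hmem : a + k - 1 ∈ List.range' a k := by
          rw [List.mem_range'_1]; omega
        have hfalse := List.filter_eq_nil_iff.mp hes _ hmem
        rw [hse] at hfalse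
        exact hfalse rfl
    | cons e rest =>
        obtain ⟨hae, hek, hnoS, hSe, hrest⟩ := filter_range'_cons _ k a e rest hes
        -- split the index range at the first sentence end e
        have hsplit : List.range' a k
            = List.range' a (e - a) ++ e :: List.range' (e + 1) (a + k - (e + 1)) := by
          have h1 : List.range' a (e - a) ++ List.range' (a + (e - a)) (k - (e - a)) = List.range' a k := by
            rw [List.range'_append_1, show (e - a) + (k - (e - a)) = k by omega]
          rw [← h1, show a + (e - a) = e by omega]
          congr 1
          rw [show k - (e - a) = (a + k - (e + 1)) + 1 by omega, List.range'_succ]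
        have hrun : ∀ i ∈ List.range' a (e - a),
            se.getD i false = false ∧ pe.getD i false = false := by
          intro i hi
          rw [List.mem_range'_1] at hi
          exact ⟨hnoS i (by omega) (by omega), hno i (by omega) (by omega)⟩
        rw [hsplit, List.foldl_append, gdt_run se pe ot ci _ hrun, List.foldl_cons]
        -- the token list of the closed sentence
        have htoks : ([] : List (Int × Int)) ++ (List.range' a (e - a)).map (gdtTok ot)
              ++ [(ot.getD e 0, (e : Int))]
            = (List.range' a (e + 1 - a)).map (gdtTok ot) := by
          rw [List.nil_append, show e + 1 - a = (e - a) + 1 by omega, List.range'_1_concat,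
              show a + (e - a) = e by omega, List.map_append]
          simp [gdtTok]
        by_cases heq : e = a + k - 1
        · -- e is the last index of the span: the paragraph is flushed here
          have hseE : se.getD e false = true := by rw [heq]; exact hse
          have hpeE : pe.getD e false = true := by rw [heq]; exact hpe
          have hlast : a + k - (e + 1) = 0 := by omega
          have hrest0 : rest = [] := by rw [hrest, hlast]; rfl
          subst hrest0
          rw [hlast]
          simp only [List.range'_zero, List.foldl_nil]
          simp only [gdtStep, hseE, hpeE, if_true]
          simp only [Prod.mk.injEq, List.append_cancel_left_eq, List.cons.injEq, and_true]
          refine ⟨?_, ?_⟩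
          · rw [List.map_append, List.foldl_append]
            simp
          · simp only [gdtSents, List.foldl_cons, List.foldl_nil, List.nil_append]
            rw [← htoks]
            simp
        · -- e is an interior sentence end: flush the sentence and recurse
          have hpeE : pe.getD e false = false := hno e hae (by omega)
          simp only [gdtStep, hSe, hpeE, if_true, Bool.false_eq_true, if_false]
          have hlt : a + k - (e + 1) < k := by omega
          rw [ih (a + k - (e+1)) hlt (e+1) doc
                (para ++ [((-1 : Int), [] ++ (List.range' a (e - a)).map (gdtTok ot) ++ [(ot.getD e 0, (e : Int))])])
                (max (((List.range' a (e - a)).map (fun i => ci.getD i 0)).foldl max cur) (ci.getD e 0))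
                (by omega)
                (by intro i h1 h2; exact hno i (by omega) (by omega))
                (by rw [show e + 1 + (a + k - (e+1)) - 1 = a + k - 1 by omega]; exact hpe)
                (by rw [show e + 1 + (a + k - (e+1)) - 1 = a + k - 1 by omega]; exact hse)]
          rw [← hrest]
          simp only [Prod.mk.injEq, List.append_cancel_left_eq, List.cons.injEq, and_true]
          refine ⟨?_, ?_⟩
          · rw [List.map_append, List.map_cons, List.foldl_append, List.foldl_cons]
          · simp only [gdtSents, List.foldl_cons, List.nil_append]
            rw [show (List.foldl (fun acc e => (acc.1 ++ [((-1 : Int), (List.range' acc.2 (e + 1 - acc.2)).map (gdtTok ot))], e + 1)) ([], e + 1) rest) = gdtSents ot rest (e+1) from rfl]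
            rw [gdtSents_seed ot rest [((-1 : Int), (List.range' a (e + 1 - a)).map (gdtTok ot))] (e+1)]
            rw [← htoks, List.append_assoc]
            simp
-- the whole document: A's fold over [a, a+k) equals B's fold over the paragraph ends
theorem gdt_doc (se pe : List Bool) (ot ci : List Int) :
    ∀ (k : Nat), ∀ (a : Nat) doc,
      (∀ i, a ≤ i → i < a + k → pe.getD i false = true → se.getD i false = true) →
      (1 ≤ k → pe.getD (a + k - 1) false = true) →
      (List.range' a k).foldl (gdtStep se pe ot ci) (doc, [], [], -1)
        = (doc ++ (gdtParas se ot ci ((List.range' a k).filter (fun i => pe.getD i false)) a).1,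
           [], [], -1) := by
  intro k
  induction k using Nat.strong_induction_on with
  | _ k ih =>
    intro a doc hinv hend
    cases hps : (List.range' a k).filter (fun i => pe.getD i false) with
    | nil =>
        have hk0 : k = 0 := by
          by_contra h
          have hk1 : 1 ≤ k := by omega
          have hmem : a + k - 1 ∈ List.range' a k := by rw [List.mem_range'_1]; omega
          have hfalse := List.filter_eq_nil_iff.mp hps _ hmem
          rw [hend hk1] at hfalse
          exact hfalse rfl
        subst hk0
        simp [gdtParas]
    | cons p rest =>
        obtain ⟨hap, hpk, hnoP, hPp, hrest⟩ := filter_range'_cons _ k a p rest hps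
        have hSp : se.getD p false = true := hinv p hap hpk hPp
        -- split the range after the first paragraph end p
        have hsplit : List.range' a k
            = List.range' a (p + 1 - a) ++ List.range' (p + 1) (a + k - (p + 1)) := by
          have key : ∀ (s m n : Nat), List.range' s m ++ List.range' (s + m) n = List.range' s (m + n) :=
            fun s m n => List.range'_append_1
          have h1 := key a (p + 1 - a) (a + k - (p + 1))
          rw [show a + (p + 1 - a) = p + 1 by omega,
              show (p + 1 - a) + (a + k - (p + 1)) = k by omega] at h1
          exact h1.symm
        rw [hsplit, List.foldl_append]
        rw [gdt_para se pe ot ci (p + 1 - a) a doc [] (-1) (by omega)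
              (by intro i h1 h2; exact hnoP i h1 (by omega))
              (by rw [show a + (p + 1 - a) - 1 = p by omega]; exact hPp)
              (by rw [show a + (p + 1 - a) - 1 = p by omega]; exact hSp)]
        rw [ih (a + k - (p + 1)) (by omega) (p + 1) _
              (by intro i h1 h2; exact hinv i (by omega) (by omega))
              (by intro h1
                  rw [show p + 1 + (a + k - (p + 1)) - 1 = a + k - 1 by omega]
                  exact hend (by omega))]
        rw [← hrest]
        have hseed := gdtParas_seed se ot ci rest ((gdtParaStep se ot ci ([], a) p).1) ((gdtParaStep se ot ci ([], a) p).2)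
        simp only [gdtParas, List.foldl_cons]
        rw [show (List.foldl (gdtParaStep se ot ci) (gdtParaStep se ot ci ([], a) p) rest)
              = List.foldl (gdtParaStep se ot ci) ((gdtParaStep se ot ci ([], a) p).1, (gdtParaStep se ot ci ([], a) p).2) rest from rfl,
            hseed]
        simp only [gdtParas, gdtParaStep, List.nil_append, List.append_assoc]

-- ===== VERDICT (by name: the statement is the Claim_ definition above) =====
theorem get_doc_tree_spec : Claim_equal_get_doc_tree := by
  intro se pe ot ci _hdom hpre
  unfold Spec_get_doc_tree get_doc_tree get_doc_tree_alt
  obtain ⟨-, -, -, hinv, hend⟩ := hpre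
  rw [List.range_eq_range']
  rw [gdt_doc se pe ot ci se.length 0 []
    (by intro i _ hi; simpa using hinv i (by simpa using hi))
    (by
      intro hk
      rcases hend with h0 | h1
      · omega
      · simp only [Nat.zero_add]
        exact h1)]
  rfl
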